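-- pv_equiv track=rewrite | github.com/oewilliams/sucess_in_showbusiness | waiting_time/waiting_time_dist.py | get_waiting_times
-- ===== SOURCE A (Python) =====
-- def get_waiting_times(X):
--
-- 	count = 1
--
-- 	times = []
--
-- 	for x in X:
-- 		if x != 0:
-- 			times.append(count)
-- 			count = 1
-- 		else:
-- 			count += 1
--
-- 	return times
-- ===== SOURCE B (Python) =====
-- def get_waiting_times(X):
--     idx = [i for i, x in enumerate(X) if x != 0]
--     if not idx:
--         return []
--     return [idx[0] + 1] + [b - a for a, b in zip(idx, idx[1:])]
-- ===== Notes on version B (the rewrite author's own statement) =====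
-- stated objective: alternative
-- what changed: Replaces the running-counter-with-reset scan by collecting the indices of nonzero elements with enumerate and emitting consecutive differences (first time = idx[0]+1).
import Mathlib
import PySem

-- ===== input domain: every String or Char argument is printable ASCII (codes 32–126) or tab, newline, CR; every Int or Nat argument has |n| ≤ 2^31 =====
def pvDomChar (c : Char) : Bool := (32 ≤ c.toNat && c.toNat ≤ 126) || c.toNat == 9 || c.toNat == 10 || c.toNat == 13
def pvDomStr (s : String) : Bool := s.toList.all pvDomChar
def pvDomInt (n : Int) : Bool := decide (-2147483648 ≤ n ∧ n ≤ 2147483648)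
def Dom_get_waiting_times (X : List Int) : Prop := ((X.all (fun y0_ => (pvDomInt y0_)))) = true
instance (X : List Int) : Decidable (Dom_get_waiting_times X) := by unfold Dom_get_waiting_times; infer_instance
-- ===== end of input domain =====

-- B replaces A's running-counter scan by an index-table-then-difference pass (objective: alternative decomposition).
-- ===== PORT A =====
def get_waiting_times (X : List Int) : List Int :=
  (X.foldl (fun (st : Int × List Int) x =>
    if x ≠ 0 then (1, st.2 ++ [st.1]) else (st.1 + 1, st.2)) (1, ([] : List Int))).2

-- ===== PORT B =====
def get_waiting_times_alt (X : List Int) : List Int :=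
  let idx := ((PySem.List.enumerate X 0).filter (fun p => p.2 != 0)).map (fun p => p.1)
  match idx with
  | [] => []
  | i0 :: rest => (i0 + 1) :: List.zipWith (fun a b => b - a) (i0 :: rest) rest

-- ===== PRECONDITION & SPEC =====
def Spec_get_waiting_times (X : List Int) (out : List Int) : Prop := out = get_waiting_times_alt X
instance (X : List Int) (out : List Int) : Decidable (Spec_get_waiting_times X out) := by unfold Spec_get_waiting_times; infer_instance

-- ===== CLAIM (what is proved, stated in full; the proofs are below) =====
def Claim_equal_get_waiting_times : Prop := ∀ (X : List Int), Dom_get_waiting_times X → Spec_get_waiting_times X (get_waiting_times X)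

-- ===== LEMMAS AND PROOFS =====

-- reference recursion for A's scan
def pvW (c : Int) : List Int → List Int
  | [] => []
  | x :: xs => if x ≠ 0 then c :: pvW 1 xs else pvW (c + 1) xs

theorem pvA_foldl (X : List Int) : ∀ (c : Int) (acc : List Int),
    (X.foldl (fun (st : Int × List Int) x =>
      if x ≠ 0 then (1, st.2 ++ [st.1]) else (st.1 + 1, st.2)) (c, acc)).2
    = acc ++ pvW c X := by
  induction X with
  | nil => intro c acc; simp [pvW]
  | cons x xs ih =>
    intro c acc
    by_cases hx : x = 0
    · simp only [List.foldl, hx, if_neg (by simp : ¬((0:Int) ≠ 0))]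
      rw [ih]; simp [pvW]
    · simp only [List.foldl, if_pos hx]
      rw [ih]; simp [pvW, hx]

-- difference pass on an index list, given the previous index p
def pvB (p : Int) : List Int → List Int
  | [] => []
  | i :: rest => (i - p) :: pvB i rest

theorem pvB_zip (rest : List Int) : ∀ (a : Int),
    List.zipWith (fun a b => b - a) (a :: rest) rest = pvB a rest := by
  induction rest with
  | nil => intro a; simp [pvB]
  | cons j rest ih => intro a; simp [pvB, ih]

def pvIdx (s : Int) (X : List Int) : List Int :=
  ((PySem.List.enumerate X s).filter (fun p => p.2 != 0)).map (fun p => p.1)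

theorem pvIdx_cons (s x : Int) (xs : List Int) :
    pvIdx s (x :: xs) = if x = 0 then pvIdx (s + 1) xs else s :: pvIdx (s + 1) xs := by
  by_cases hx : x = 0 <;> simp [pvIdx, PySem.List.enumerate_cons, hx]

theorem pvW_eq_pvB (X : List Int) : ∀ (c s : Int),
    pvW c X = pvB (s - c) (pvIdx s X) := by
  induction X with
  | nil => intro c s; simp [pvW, pvIdx, PySem.List.enumerate_nil, pvB]
  | cons x xs ih =>
    intro c s
    rw [pvIdx_cons]
    by_cases hx : x = 0
    · simp [pvW, hx]
      rw [ih (c + 1) (s + 1)]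
      congr 1; ring
    · have e : s + 1 - 1 = s := by ring
      have e2 : s - (s - c) = c := by ring
      simp [pvW, pvB, hx, e, e2, ih 1 (s + 1)]

theorem pvAlt_eq (X : List Int) : get_waiting_times_alt X = pvB (-1) (pvIdx 0 X) := by
  unfold get_waiting_times_alt
  show (match pvIdx 0 X with
        | [] => []
        | i0 :: rest => (i0 + 1) :: List.zipWith (fun a b => b - a) (i0 :: rest) rest)
      = pvB (-1) (pvIdx 0 X)
  cases pvIdx 0 X with
  | nil => simp [pvB]
  | cons i0 rest =>
    simp only [pvB, pvB_zip]
    constructor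

-- ===== VERDICT (by name: the statement is the Claim_ definition above) =====
theorem get_waiting_times_spec : Claim_equal_get_waiting_times := by
  intro X _
  unfold Spec_get_waiting_times get_waiting_times
  rw [pvA_foldl X 1 [], pvAlt_eq]
  simp only [List.nil_append]
  rw [pvW_eq_pvB X 1 0]
  norm_num
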